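-- pv_equiv track=rewrite | github.com/BytesAndCoffee/BytesAndCoffee-bestof | QuadShot/Drip.py | make_callable
-- ===== SOURCE A (Python) =====
-- def make_callable(program, calls):
--     call = False
--     out = []
--     count = 0
--     for i in range(len(program)):
--         if program[i] == '0A00':
--             call = True
--             continue
--         elif call:
--             out.append(calls[program[i]])
--             program[i] = out[-1]
--             count += 1
--             call = False
--     return program, out
-- ===== SOURCE B (Python) =====
-- def make_callable(program, calls):
--     markers = [i for i, v in enumerate(program) if v == '0A00']
--     out = []
--     for m in markers:
--         j = m + 1
--         if j < len(program) and program[j] != '0A00':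
--             out.append(calls[program[j]])
--             program[j] = out[-1]
--     return program, out
-- ===== Notes on version B (the rewrite author's own statement) =====
-- stated objective: alternative
-- what changed: A carries a pending-call boolean through a single scan; B first collects the indices of all '0A00' markers, then patches the position after each marker, with no flag state.
import Mathlib
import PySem

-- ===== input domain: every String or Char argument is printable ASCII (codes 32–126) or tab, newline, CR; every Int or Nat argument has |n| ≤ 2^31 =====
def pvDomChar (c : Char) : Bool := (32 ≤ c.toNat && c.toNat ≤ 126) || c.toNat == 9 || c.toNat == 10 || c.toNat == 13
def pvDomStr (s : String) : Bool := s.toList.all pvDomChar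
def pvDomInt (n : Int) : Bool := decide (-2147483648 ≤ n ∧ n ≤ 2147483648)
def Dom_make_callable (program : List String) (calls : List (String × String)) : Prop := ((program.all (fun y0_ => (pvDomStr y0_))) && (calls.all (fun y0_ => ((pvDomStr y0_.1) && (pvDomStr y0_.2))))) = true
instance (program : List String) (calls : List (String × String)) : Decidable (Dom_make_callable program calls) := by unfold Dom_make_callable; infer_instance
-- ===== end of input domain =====

-- B replaces A's carried boolean flag by a two-pass decomposition (collect marker
-- indices first, then patch each position after a marker); same O(n) cost ("alternative").
-- Both A and B mutate `program` in place in Python in the same way; the returned pair is what is proved equal.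

-- ===== PORT A =====
-- loop body of A: state = (call, program, out, count)
def pvStepA (calls : List (String × String)) (st : Bool × List String × List String × Int) (i : Nat) : Bool × List String × List String × Int :=
  let call := st.1
  let prog := st.2.1
  let out := st.2.2.1
  let count := st.2.2.2
  if prog.getD i "" == "0A00" then (true, prog, out, count)
  else if call then
    let nv := ((PySem.Dict.ofList calls).get? (prog.getD i "")).getD ""   -- calls[program[i]]; KeyError excluded by Pre_
    (false, prog.set i nv, out ++ [nv], count + 1)
  else st

def make_callable (program : List String) (calls : List (String × String)) : List String × List String :=
  let st := (List.range program.length).foldl (pvStepA calls) (false, program, [], 0)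
  (st.2.1, st.2.2.1)

-- ===== PORT B =====
-- loop body of B: state = (program, out)
def pvStepB (calls : List (String × String)) (st : List String × List String) (m : Int) : List String × List String :=
  let prog := st.1
  let out := st.2
  let j := m + 1
  if j < (prog.length : Int) then
    if PySem.List.pyGetD prog j "" == "0A00" then st
    else
      let nv := ((PySem.Dict.ofList calls).get? (PySem.List.pyGetD prog j "")).getD ""   -- calls[program[j]]; KeyError excluded by Pre_
      (PySem.List.pySetD prog j nv, out ++ [nv])
  else st

def make_callable_alt (program : List String) (calls : List (String × String)) : List String × List String :=
  let markers := (PySem.List.enumerate program).filterMap (fun p => if p.2 == "0A00" then some p.1 else none)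
  markers.foldl (pvStepB calls) (program, [])

-- ===== PRECONDITION & SPEC =====
-- Pre_ excludes exactly the inputs where Python A raises KeyError: a position right
-- after a '0A00' marker that is itself not '0A00' and whose value is not a key of calls.
def Pre_make_callable (program : List String) (calls : List (String × String)) : Prop :=
  ∀ i ∈ List.range program.length, 0 < i → program.getD (i-1) "" = "0A00" →
    program.getD i "" ≠ "0A00" → ((PySem.Dict.ofList calls).get? (program.getD i "")).isSome = true
instance (program : List String) (calls : List (String × String)) : Decidable (Pre_make_callable program calls) := by unfold Pre_make_callable; infer_instance

def pvWitness_make_callable : List String × (List (String × String)) := (["0A00", "AB"], [("AB", "CD")])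

def Spec_make_callable (program : List String) (calls : List (String × String)) (out : List String × List String) : Prop := out = make_callable_alt program calls
instance (program : List String) (calls : List (String × String)) (out : List String × List String) : Decidable (Spec_make_callable program calls out) := by unfold Spec_make_callable; infer_instance

-- ===== CLAIM (what is proved, stated in full; the proofs are below) =====
def Claim_equal_make_callable : Prop := ∀ (program : List String) (calls : List (String × String)), Dom_make_callable program calls → Pre_make_callable program calls → Spec_make_callable program calls (make_callable program calls)

-- ===== LEMMAS AND PROOFS =====

-- common specification: process the list structurally with the pending-call flag;
-- returns (final flag, rewritten program, out)
def pvSpecRec (calls : List (String × String)) : Bool → List String → Bool × List String × List String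
  | call, [] => (call, [], [])
  | call, x :: rs =>
    if x == "0A00" then
      let r := pvSpecRec calls true rs
      (r.1, x :: r.2.1, r.2.2)
    else if call then
      let nv := ((PySem.Dict.ofList calls).get? x).getD ""
      let r := pvSpecRec calls false rs
      (r.1, nv :: r.2.1, nv :: r.2.2)
    else
      let r := pvSpecRec calls call rs
      (r.1, x :: r.2.1, r.2.2)

theorem pv_getD_append (done : List String) (x : String) (rs : List String) (d : String) :
    (done ++ x :: rs).getD done.length d = x := by
  induction done with
  | nil => simp [List.getD]
  | cons a l ih => simp [List.getD]

theorem pv_set_append (done : List String) (x v : String) (rs : List String) :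
    (done ++ x :: rs).set done.length v = done ++ v :: rs := by
  induction done with
  | nil => simp
  | cons a l ih => simp [ih]

-- marker indices of B's first pass, with an explicit integer offset
def pvMarkers : Int → List String → List Int
  | _, [] => []
  | s, x :: rs => if x == "0A00" then s :: pvMarkers (s+1) rs else pvMarkers (s+1) rs

theorem pv_markers_eq (xs : List String) : ∀ (s : Int),
    (PySem.List.enumerate xs s).filterMap (fun p => if p.2 == "0A00" then some p.1 else none) = pvMarkers s xs := by
  induction xs with
  | nil => intro s; simp [PySem.List.enumerate_nil, pvMarkers]
  | cons x rs ih =>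
    intro s
    rw [PySem.List.enumerate_cons, List.filterMap_cons, ih]
    by_cases h : x = "0A00" <;> simp [pvMarkers, h]

theorem pv_A_aux (calls : List (String × String)) (rest : List String) :
    ∀ (done out : List String) (call : Bool) (count : Int),
    (List.range' done.length rest.length).foldl (pvStepA calls) (call, done ++ rest, out, count) =
      ((pvSpecRec calls call rest).1, done ++ (pvSpecRec calls call rest).2.1,
        out ++ (pvSpecRec calls call rest).2.2, count + ((pvSpecRec calls call rest).2.2.length : Int)) := by
  induction rest with
  | nil => intro done out call count; simp [pvSpecRec]
  | cons x rs ih =>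
    intro done out call count
    rw [show (x :: rs).length = rs.length + 1 from rfl, List.range'_succ]
    by_cases hx : x = "0A00"
    · have hstep : pvStepA calls (call, done ++ x :: rs, out, count) done.length
          = (true, done ++ x :: rs, out, count) := by
        simp [pvStepA, hx]
      rw [List.foldl_cons, hstep]
      have hlen : done.length + 1 = (done ++ [x]).length := by simp
      have hsplit : done ++ x :: rs = (done ++ [x]) ++ rs := by simp
      rw [hsplit, hlen, ih]
      simp [pvSpecRec, hx]
    · by_cases hc : call
      · have hstep : pvStepA calls (call, done ++ x :: rs, out, count) done.length
            = (false, done ++ (((PySem.Dict.ofList calls).get? x).getD "") :: rs,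
               out ++ [((PySem.Dict.ofList calls).get? x).getD ""], count + 1) := by
          simp [pvStepA, hx, hc]
        rw [List.foldl_cons, hstep]
        set nv := ((PySem.Dict.ofList calls).get? x).getD "" with hnv
        have hlen : done.length + 1 = (done ++ [nv]).length := by simp
        have hsplit : done ++ nv :: rs = (done ++ [nv]) ++ rs := by simp
        rw [hsplit, hlen, ih]
        simp [pvSpecRec, hx, hc, ← hnv]
        omega
      · have hstep : pvStepA calls (call, done ++ x :: rs, out, count) done.length
            = (call, done ++ x :: rs, out, count) := by
          simp [pvStepA, hx, hc]
        rw [List.foldl_cons, hstep]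
        have hlen : done.length + 1 = (done ++ [x]).length := by simp
        have hsplit : done ++ x :: rs = (done ++ [x]) ++ rs := by simp
        rw [hsplit, hlen, ih]
        simp [pvSpecRec, hx, hc]

theorem pvMarkers_cons_marker (s : Int) (rs : List String) :
    pvMarkers s ("0A00" :: rs) = s :: pvMarkers (s+1) rs := by simp [pvMarkers]

theorem pvMarkers_cons_other (s : Int) (y : String) (rs : List String) (hy : y ≠ "0A00") :
    pvMarkers s (y :: rs) = pvMarkers (s+1) rs := by simp [pvMarkers, hy]

theorem pv_B_aux (calls : List (String × String)) :
    ∀ (rest done out : List String),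
    (pvMarkers (done.length : Int) rest).foldl (pvStepB calls) (done ++ rest, out) =
      (done ++ (pvSpecRec calls false rest).2.1, out ++ (pvSpecRec calls false rest).2.2)
  | [], done, out => by simp [pvMarkers, pvSpecRec]
  | [x], done, out => by
    by_cases hx : x = "0A00"
    · subst hx
      have hstep : pvStepB calls (done ++ ["0A00"], out) (done.length : Int) = (done ++ ["0A00"], out) := by
        simp [pvStepB]
      rw [pvMarkers_cons_marker]
      simp only [pvMarkers, List.foldl_cons, List.foldl_nil]
      rw [hstep]
      simp [pvSpecRec]
    · rw [pvMarkers_cons_other _ _ _ hx]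
      simp [pvMarkers, pvSpecRec, hx]
  | x :: y :: rs, done, out => by
    by_cases hx : x = "0A00"
    · subst hx
      by_cases hy : y = "0A00"
      · subst hy
        have hget : PySem.List.pyGetD (done ++ "0A00" :: "0A00" :: rs) ((done.length : Int) + 1) "" = "0A00" := by
          have h1 : ((done.length : Int) + 1) = (((done ++ ["0A00"]).length : Nat) : Int) := by simp
          have h2 : done ++ "0A00" :: "0A00" :: rs = (done ++ ["0A00"]) ++ "0A00" :: rs := by simp
          rw [h1, h2, PySem.List.pyGetD_natCast, pv_getD_append]
        have hstep : pvStepB calls (done ++ "0A00" :: "0A00" :: rs, out) (done.length : Int)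
            = (done ++ "0A00" :: "0A00" :: rs, out) := by
          simp [pvStepB, hget]
        rw [pvMarkers_cons_marker, List.foldl_cons, hstep]
        have h1 : ((done.length : Int) + 1) = (((done ++ ["0A00"]).length : Nat) : Int) := by simp
        have h2 : done ++ "0A00" :: "0A00" :: rs = (done ++ ["0A00"]) ++ "0A00" :: rs := by simp
        rw [h1, h2, pv_B_aux calls ("0A00" :: rs) (done ++ ["0A00"]) out]
        simp [pvSpecRec]
      · have hget : PySem.List.pyGetD (done ++ "0A00" :: y :: rs) ((done.length : Int) + 1) "" = y := by
          have h1 : ((done.length : Int) + 1) = (((done ++ ["0A00"]).length : Nat) : Int) := by simp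
          have h2 : done ++ "0A00" :: y :: rs = (done ++ ["0A00"]) ++ y :: rs := by simp
          rw [h1, h2, PySem.List.pyGetD_natCast, pv_getD_append]
        set nv := ((PySem.Dict.ofList calls).get? y).getD "" with hnv
        have hset : PySem.List.pySetD (done ++ "0A00" :: y :: rs) ((done.length : Int) + 1) nv
            = done ++ "0A00" :: nv :: rs := by
          have h1 : ((done.length : Int) + 1) = (((done ++ ["0A00"]).length : Nat) : Int) := by simp
          have h2 : done ++ "0A00" :: y :: rs = (done ++ ["0A00"]) ++ y :: rs := by simp
          rw [h1, h2, PySem.List.pySetD_natCast, pv_set_append]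
          simp
        have hstep : pvStepB calls (done ++ "0A00" :: y :: rs, out) (done.length : Int)
            = (done ++ "0A00" :: nv :: rs, out ++ [nv]) := by
          simp [pvStepB, hget, hy, hset, ← hnv]
        rw [pvMarkers_cons_marker, List.foldl_cons, hstep,
            pvMarkers_cons_other _ _ _ hy]
        have h4 : ((done.length : Int) + 1 + 1) = (((done ++ ["0A00", nv]).length : Nat) : Int) := by
          simp; ring
        have h5 : done ++ "0A00" :: nv :: rs = (done ++ ["0A00", nv]) ++ rs := by simp
        rw [h4, h5, pv_B_aux calls rs (done ++ ["0A00", nv]) (out ++ [nv])]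
        simp [pvSpecRec, hy, ← hnv]
    · rw [pvMarkers_cons_other _ _ _ hx]
      have h1 : ((done.length : Int) + 1) = (((done ++ [x]).length : Nat) : Int) := by simp
      have h2 : done ++ x :: y :: rs = (done ++ [x]) ++ y :: rs := by simp
      rw [h1, h2, pv_B_aux calls (y :: rs) (done ++ [x]) out]
      simp [pvSpecRec, hx]
  termination_by rest _ _ => rest.length

theorem pv_A_eq_spec (program : List String) (calls : List (String × String)) :
    make_callable program calls
      = ((pvSpecRec calls false program).2.1, (pvSpecRec calls false program).2.2) := by
  unfold make_callable
  rw [List.range_eq_range']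
  have := pv_A_aux calls program [] [] false 0
  simp only [List.length_nil, List.nil_append] at this
  rw [this]

theorem pv_B_eq_spec (program : List String) (calls : List (String × String)) :
    make_callable_alt program calls
      = ((pvSpecRec calls false program).2.1, (pvSpecRec calls false program).2.2) := by
  unfold make_callable_alt
  rw [pv_markers_eq]
  have := pv_B_aux calls program [] []
  simpa using this

-- ===== VERDICT (by name: the statement is the Claim_ definition above) =====
theorem make_callable_spec : Claim_equal_make_callable := by
  intro program calls _ _
  unfold Spec_make_callable
  rw [pv_A_eq_spec, pv_B_eq_spec]
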